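-- pv_equiv track=rewrite | github.com/SarahKohn/PulseOx-FM | plotting/make_all_figures.py | _wrap_figure5_label_two_lines
-- ===== SOURCE A (Python) =====
-- def _wrap_figure5_label_two_lines(text: str, max_single_line: int = 38) -> str:
--     if len(text) <= max_single_line:
--         return text
--     mid = len(text) // 2
--     best, best_d = -1, len(text) + 1
--     for i, c in enumerate(text):
--         if c == " ":
--             d = abs(i - mid)
--             if d < best_d:
--                 best_d, best = d, i
--     if best <= 0:
--         return text
--     return f"{text[:best].rstrip()}\n{text[best + 1 :].lstrip()}"
-- ===== SOURCE B (Python) =====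
-- def _wrap_figure5_label_two_lines(text: str, max_single_line: int = 38) -> str:
--     if len(text) <= max_single_line:
--         return text
--     n = len(text)
--     mid = n // 2
--     best = None
--     for offset in range(n + 1):
--         i = mid - offset
--         if 0 <= i < n and text[i] == " ":
--             best = i
--             break
--         j = mid + offset
--         if j < n and text[j] == " ":
--             best = j
--             break
--     if best is None or best <= 0:
--         return text
--     return text[:best].rstrip() + "\n" + text[best + 1:].lstrip()
-- ===== Notes on version B (the rewrite author's own statement) =====
-- stated objective: alternative
-- what changed: Replaces A's full left-to-right scan that keeps a running best-distance space with an outward search from the midpoint (offset 0,1,2,..., left candidate before right) that returns the first space found, so it stops early instead of maintaining a minimum over the whole string.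
import Mathlib
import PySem

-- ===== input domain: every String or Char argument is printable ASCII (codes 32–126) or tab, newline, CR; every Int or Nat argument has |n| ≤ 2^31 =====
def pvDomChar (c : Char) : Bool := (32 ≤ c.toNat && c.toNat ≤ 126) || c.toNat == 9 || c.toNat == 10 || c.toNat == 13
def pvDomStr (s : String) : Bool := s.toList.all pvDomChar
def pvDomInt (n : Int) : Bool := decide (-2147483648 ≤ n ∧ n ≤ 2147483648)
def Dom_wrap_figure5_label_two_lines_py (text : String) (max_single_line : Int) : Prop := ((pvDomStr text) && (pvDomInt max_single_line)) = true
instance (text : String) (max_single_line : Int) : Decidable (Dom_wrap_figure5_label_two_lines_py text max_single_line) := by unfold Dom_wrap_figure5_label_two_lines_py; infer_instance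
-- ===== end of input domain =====

-- B replaces A's full left-to-right scan keeping a running best-distance space by an
-- outward search from the midpoint that returns the first space it meets (alternative).

-- ===== PORT A =====
-- loop body of A's for-loop: update (best, best_d) on a space
def pvStepA (mid : Int) (bd : Int × Int) (ic : Int × Char) : Int × Int :=
  if ic.2 = ' ' then
    if |ic.1 - mid| < bd.2 then (ic.1, |ic.1 - mid|) else bd
  else bd

def wrap_figure5_label_two_lines_py (text : String) (max_single_line : Int) : String :=
  if PySem.Str.len text ≤ max_single_line then text
  else
    let cs := text.toList
    let mid : Int := PySem.Int.floordiv (PySem.Str.len text) 2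
    let st := (PySem.List.enumerate cs 0).foldl (pvStepA mid) (-1, PySem.Str.len text + 1)
    if st.1 ≤ 0 then text
    else
      String.ofList
        (PySem.Chars.rstrip (PySem.List.slice cs none (some st.1)) ++
          '\n' :: PySem.Chars.lstrip (PySem.List.slice cs (some (st.1 + 1)) none))

-- ===== PORT B =====
-- B's loop: offsets 0,1,2,… from the midpoint, left candidate first; fuel = n+1 = range(n+1)
def pvSearchB (cs : List Char) (mid : Nat) : Nat → Nat → Option Nat
  | _, 0 => none
  | o, fuel+1 =>
    if o ≤ mid ∧ cs[mid - o]? = some ' ' then some (mid - o)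
    else if cs[mid + o]? = some ' ' then some (mid + o)
    else pvSearchB cs mid (o+1) fuel

def wrap_figure5_label_two_lines_py_alt (text : String) (max_single_line : Int) : String :=
  if PySem.Str.len text ≤ max_single_line then text
  else
    let cs := text.toList
    let n := cs.length
    let mid := n / 2
    match pvSearchB cs mid 0 (n+1) with
    | none => text
    | some b =>
      if b = 0 then text
      else
        String.ofList
          (PySem.Chars.rstrip (cs.take b) ++ '\n' :: PySem.Chars.lstrip (cs.drop (b+1)))

-- ===== PRECONDITION & SPEC =====
def Spec_wrap_figure5_label_two_lines_py (text : String) (max_single_line : Int) (out : String) : Prop := out = wrap_figure5_label_two_lines_py_alt text max_single_line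
instance (text : String) (max_single_line : Int) (out : String) : Decidable (Spec_wrap_figure5_label_two_lines_py text max_single_line out) := by unfold Spec_wrap_figure5_label_two_lines_py; infer_instance

-- ===== CLAIM (what is proved, stated in full; the proofs are below) =====
def Claim_equal_wrap_figure5_label_two_lines_py : Prop := ∀ (text : String) (max_single_line : Int), Dom_wrap_figure5_label_two_lines_py text max_single_line → Spec_wrap_figure5_label_two_lines_py text max_single_line (wrap_figure5_label_two_lines_py text max_single_line)

-- ===== LEMMAS AND PROOFS =====

-- Nat distance to the midpoint
def pvDistd (mid i : Nat) : Nat := max (mid - i) (i - mid)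

theorem pvDistd_cast (mid i : Nat) : |(i : Int) - (mid : Int)| = ((pvDistd mid i : Nat) : Int) := by
  rcases abs_cases ((i : Int) - (mid : Int)) with ⟨h1, h2⟩ | ⟨h1, h2⟩ <;>
    simp only [pvDistd] <;> omega

-- invariant of A's fold over the first k entries of enumerate
def pvInvA (cs : List Char) (mid : Int) (k : Nat) (st : Int × Int) : Prop :=
  (st = (-1, (cs.length : Int) + 1) ∧ ∀ i : Nat, i < k → cs[i]? ≠ some ' ') ∨
  (∃ b : Nat, b < k ∧ cs[b]? = some ' ' ∧ st = ((b : Int), |(b : Int) - mid|) ∧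
    (∀ i : Nat, i < k → cs[i]? = some ' ' →
      |(b : Int) - mid| ≤ |(i : Int) - mid| ∧ (|(i : Int) - mid| = |(b : Int) - mid| → b ≤ i)))

theorem pvFoldA_inv (cs : List Char) (mid : Int) (hm0 : 0 ≤ mid) (hmn : mid ≤ (cs.length : Int)) :
    ∀ k : Nat, k ≤ cs.length →
      pvInvA cs mid k (((PySem.List.enumerate cs 0).take k).foldl (pvStepA mid) (-1, (cs.length : Int) + 1)) := by
  intro k
  induction k with
  | zero => intro _; left; constructor <;> simp
  | succ k ih =>
    intro hk
    have hkn : k < cs.length := by omega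
    have hE : (PySem.List.enumerate cs 0).take (k+1)
        = (PySem.List.enumerate cs 0).take k ++ [((k : Int), cs[k])] := by
      rw [List.take_add_one]
      have : (PySem.List.enumerate cs 0)[k]? = some ((k : Int), cs[k]) := by
        rw [List.getElem?_eq_getElem (by simpa [PySem.List.length_enumerate] using hkn)]
        simp [PySem.List.getElem_enumerate]
      simp [this]
    rw [hE, List.foldl_append]
    rcases ih (by omega) with ⟨hst, hno⟩ | ⟨b, hb, hbsp, hst, hmin⟩
    · rw [hst]
      by_cases hsp : cs[k] = ' '
      · right
        refine ⟨k, by omega, by simp [hsp, List.getElem?_eq_getElem hkn], ?_, ?_⟩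
        · have habs : |(k : Int) - mid| < (cs.length : Int) + 1 := by
            rcases abs_cases ((k : Int) - mid) with ⟨h1, h2⟩ | ⟨h1, h2⟩ <;> omega
          simp [pvStepA, hsp, habs]
        · intro i hi hisp
          rcases Nat.lt_or_ge i k with h | h
          · exact absurd hisp (hno i h)
          · have : i = k := by omega
            subst this; exact ⟨le_refl _, fun _ => le_refl _⟩
      · left
        refine ⟨by simp [pvStepA, hsp], ?_⟩
        intro i hi
        rcases Nat.lt_or_ge i k with h | h
        · exact hno i h
        · have : i = k := by omega
          subst this; simp [List.getElem?_eq_getElem hkn, hsp]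
    · rw [hst]
      by_cases hsp : cs[k] = ' '
      · by_cases hlt : |(k : Int) - mid| < |(b : Int) - mid|
        · right
          refine ⟨k, by omega, by simp [hsp, List.getElem?_eq_getElem hkn], by simp [pvStepA, hsp, hlt], ?_⟩
          intro i hi hisp
          rcases Nat.lt_or_ge i k with h | h
          · have := (hmin i h hisp).1; exact ⟨by omega, fun he => by omega⟩
          · have : i = k := by omega
            subst this; exact ⟨le_refl _, fun _ => le_refl _⟩
        · right
          refine ⟨b, by omega, hbsp, by simp [pvStepA, hsp, hlt], ?_⟩
          intro i hi hisp
          rcases Nat.lt_or_ge i k with h | h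
          · exact hmin i h hisp
          · have : i = k := by omega
            subst this; exact ⟨by omega, fun _ => by omega⟩
      · right
        exact ⟨b, by omega, hbsp, by simp [pvStepA, hsp], fun i hi hisp => by
          rcases Nat.lt_or_ge i k with h | h
          · exact hmin i h hisp
          · have : i = k := by omega
            subst this
            simp [List.getElem?_eq_getElem hkn, hsp] at hisp⟩

-- characterization of B's outward search
theorem pvSearchB_spec (cs : List Char) (mid : Nat) (hm : mid ≤ cs.length) :
    ∀ fuel o : Nat, cs.length + 1 ≤ fuel + o →
      (∀ i : Nat, cs[i]? = some ' ' → o ≤ pvDistd mid i) →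
      (pvSearchB cs mid o fuel = none ∧ ∀ i : Nat, cs[i]? ≠ some ' ') ∨
      (∃ b : Nat, pvSearchB cs mid o fuel = some b ∧ cs[b]? = some ' ' ∧
        (∀ i : Nat, cs[i]? = some ' ' →
          pvDistd mid b ≤ pvDistd mid i ∧ (pvDistd mid i = pvDistd mid b → b ≤ i))) := by
  intro fuel
  induction fuel with
  | zero =>
    intro o hfo hno
    left
    refine ⟨rfl, fun i hi => ?_⟩
    have hlen : i < cs.length := (List.getElem?_eq_some_iff.mp hi).1
    have := hno i hi
    simp only [pvDistd] at this
    omega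
  | succ fuel ih =>
    intro o hfo hno
    have hunf : pvSearchB cs mid o (fuel+1)
        = (if o ≤ mid ∧ cs[mid - o]? = some ' ' then some (mid - o)
          else if cs[mid + o]? = some ' ' then some (mid + o)
          else pvSearchB cs mid (o+1) fuel) := by
      rw [pvSearchB]
    rw [hunf]
    by_cases hL : o ≤ mid ∧ cs[mid - o]? = some ' '
    · right
      refine ⟨mid - o, by simp [hL], hL.2, ?_⟩
      intro i hi
      have hom := hL.1
      have hdb : pvDistd mid (mid - o) = o := by simp only [pvDistd]; omega
      have hdi := hno i hi
      refine ⟨by omega, fun he => ?_⟩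
      simp only [pvDistd] at he hdb
      omega
    · by_cases hR : cs[mid + o]? = some ' '
      · right
        have hlen : mid + o < cs.length := (List.getElem?_eq_some_iff.mp hR).1
        refine ⟨mid + o, by simp [hL, hR], hR, ?_⟩
        intro i hi
        have hdb : pvDistd mid (mid + o) = o := by simp only [pvDistd]; omega
        have hdi := hno i hi
        refine ⟨by omega, fun he => ?_⟩
        have hcase : mid + o ≤ i ∨ (o ≤ mid ∧ i = mid - o) := by
          simp only [pvDistd] at he hdb
          omega
        rcases hcase with h | ⟨h1, h2⟩
        · omega
        · exact absurd ⟨h1, h2 ▸ hi⟩ hL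
      · have hstep : ∀ i : Nat, cs[i]? = some ' ' → o + 1 ≤ pvDistd mid i := by
          intro i hi
          have hdi := hno i hi
          rcases Nat.lt_or_ge (pvDistd mid i) (o+1) with h | h
          · exfalso
            have hcase : i = mid + o ∨ (o ≤ mid ∧ i = mid - o) := by
              simp only [pvDistd] at hdi h
              omega
            rcases hcase with h1 | ⟨h1, h2⟩
            · exact hR (h1 ▸ hi)
            · exact hL ⟨h1, h2 ▸ hi⟩
          · exact h
        have := ih (o+1) (by omega) hstep
        simp only [if_neg hL, if_neg hR]
        exact this

theorem pv_take_len (cs : List Char) :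
    (PySem.List.enumerate cs 0).take cs.length = PySem.List.enumerate cs 0 := by
  apply List.take_of_length_le
  simp [PySem.List.length_enumerate]

-- ===== VERDICT (by name: the statement is the Claim_ definition above) =====
theorem wrap_figure5_label_two_lines_py_spec : Claim_equal_wrap_figure5_label_two_lines_py := by
  intro text m _
  unfold Spec_wrap_figure5_label_two_lines_py
  unfold wrap_figure5_label_two_lines_py wrap_figure5_label_two_lines_py_alt
  set cs := text.toList with hcs
  set n := cs.length with hn
  have hlen : PySem.Str.len text = (n : Int) := by simp [PySem.Str.len_eq, hcs, hn]
  rw [hlen]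
  by_cases hg : (n : Int) ≤ m
  · rw [if_pos hg, if_pos hg]
  · rw [if_neg hg, if_neg hg]
    have hmid : PySem.Int.floordiv ((n : Nat) : Int) 2 = ((n / 2 : Nat) : Int) := by
      exact_mod_cast PySem.Int.floordiv_natCast n 2
    rw [hmid]
    set midN := n / 2 with hmidN
    have hA := pvFoldA_inv cs ((midN : Nat) : Int) (by positivity)
      (by rw [← hn]; exact_mod_cast Nat.div_le_self n 2) n (le_refl n)
    rw [pv_take_len] at hA
    have hB := pvSearchB_spec cs midN (by rw [← hn]; omega) (n+1) 0 (by omega) (by intro i _; omega)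
    simp only [] at hA hB ⊢
    rcases hA with ⟨hst, hnoA⟩ | ⟨b, hbn, hbsp, hst, hminA⟩
    · rcases hB with ⟨hBn, _⟩ | ⟨b', hB', hb'sp, _⟩
      · rw [hst, hBn]
        norm_num
      · exact absurd hb'sp (hnoA b' (List.getElem?_eq_some_iff.mp hb'sp).1)
    · rcases hB with ⟨_, hnoB⟩ | ⟨b', hB', hb'sp, hminB⟩
      · exact absurd hbsp (hnoB b)
      · have hbb' : b = b' := by
          have h1 := hminA b' (List.getElem?_eq_some_iff.mp hb'sp).1 hb'sp
          have h2 := hminB b hbsp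
          rw [pvDistd_cast, pvDistd_cast] at h1
          have hle : pvDistd midN b ≤ pvDistd midN b' := by exact_mod_cast h1.1
          have heq : pvDistd midN b = pvDistd midN b' := le_antisymm hle (h2.1)
          have hb'le : b' ≤ b := h2.2 heq
          have hble : b ≤ b' := h1.2 (by exact_mod_cast heq.symm)
          omega
        subst hbb'
        rw [hst, hB']
        by_cases hb0 : b = 0
        · subst hb0; norm_num
        · have hpos : ¬ ((b : Int) ≤ 0) := by omega
          simp only [hpos, if_false, hb0, if_false]
          have h1 : PySem.List.slice cs none (some ((b : Nat) : Int)) = cs.take b :=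
            PySem.List.slice_to_natCast cs b
          have h2 : PySem.List.slice cs (some (((b : Nat) : Int) + 1)) none = cs.drop (b+1) := by
            have he : ((b : Nat) : Int) + 1 = (((b + 1 : Nat) : Nat) : Int) := by push_cast; ring
            rw [he]
            exact PySem.List.slice_from_natCast cs (b+1)
          rw [h1, h2]
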